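-- pv_equiv track=rewrite | github.com/UVCHIKORITA/BIOprep | assortedquestions/array_eversion.py | find_num_eversions
-- ===== SOURCE A (Python) =====
-- def find_num_eversions(array_n, k):
--     last_val = array_n[-1]
--     if last_val == max(array_n):
--         return k
--     else:
--         new_array = []
--         for item in array_n:
--             if item > last_val:
--                 new_array.append(item)
--         return find_num_eversions(new_array, k+1)
-- ===== SOURCE B (Python) =====
-- def find_num_eversions(array_n, k):
--     best = array_n[-1]
--     count = 0
--     for x in reversed(array_n):
--         if x > best:
--             best = x
--             count += 1
--     return k + count
-- ===== Notes on version B (the rewrite author's own statement) =====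
-- stated objective: faster
-- what changed: Replaced A's recursive rounds of re-filtering the list and re-computing its max with a single right-to-left pass that counts strict running-maximum records beyond the last element.
-- outside the precondition, e.g. on find_num_eversions([], 0): A raises IndexError, B raises IndexError
import Mathlib
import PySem

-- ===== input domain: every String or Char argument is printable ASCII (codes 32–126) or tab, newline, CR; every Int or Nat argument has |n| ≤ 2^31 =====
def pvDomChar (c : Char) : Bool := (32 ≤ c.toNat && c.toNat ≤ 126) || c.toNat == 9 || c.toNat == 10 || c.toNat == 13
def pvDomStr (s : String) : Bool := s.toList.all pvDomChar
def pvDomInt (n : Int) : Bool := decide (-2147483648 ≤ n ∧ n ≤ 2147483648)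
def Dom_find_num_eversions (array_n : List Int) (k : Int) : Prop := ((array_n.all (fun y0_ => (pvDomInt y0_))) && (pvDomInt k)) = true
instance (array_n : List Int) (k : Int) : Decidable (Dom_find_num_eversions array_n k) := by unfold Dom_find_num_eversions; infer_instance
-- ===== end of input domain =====

-- B replaces A's quadratic repeated filter-and-recurse rounds by one right-to-left
-- pass counting strict running-maximum records past the last element (objective: faster, O(n)).

-- termination helper for port A: filtering out the last element shortens the list
theorem pvFilter_len_lt (l : List Int) (v : Int) (hv : v ∈ l) :
    (l.filter (fun item => decide (v < item))).length < l.length := by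
  induction l with
  | nil => cases hv
  | cons x xs ih =>
    have hle := List.length_filter_le (fun item => decide (v < item)) xs
    rcases List.mem_cons.mp hv with h | h
    · subst h
      simp only [List.filter_cons, lt_irrefl, decide_false, Bool.false_eq_true,
        if_false, List.length_cons]
      omega
    · have := ih h
      by_cases hx : v < x
      · simp only [List.filter_cons, hx, decide_true, if_true, List.length_cons]
        omega
      · simp only [List.filter_cons, hx, decide_false, Bool.false_eq_true, if_false,
          List.length_cons]
        omega

-- ===== PORT A =====
def find_num_eversions (array_n : List Int) (k : Int) : Int :=
  match h : PySem.List.pyGet? array_n (-1) with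
  | none => 0   -- Python raises IndexError here; excluded by Pre_
  | some last_val =>
    match PySem.List.max? array_n (fun y => y) with
    | none => 0   -- unreachable: the list is nonempty
    | some m =>
      if last_val = m then k
      else find_num_eversions (array_n.filter (fun item => decide (last_val < item))) (k + 1)
termination_by array_n.length
decreasing_by
  have hlt := pvFilter_len_lt array_n last_val (PySem.List.mem_of_pyGet?_eq_some _ h)
  have he : (List.filter (fun x : {x // x ∈ array_n} => decide (last_val < ↑x)) array_n.attach).unattach
      = List.filter (fun item => decide (last_val < item)) array_n := by
    rw [List.unattach_filter (g := fun item => decide (last_val < item)) (hf := fun x h => rfl), List.unattach_attach]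
  rw [he]
  exact hlt

-- ===== PORT B =====
def find_num_eversions_alt (array_n : List Int) (k : Int) : Int :=
  match PySem.List.pyGet? array_n (-1) with
  | none => 0   -- Python raises IndexError here; excluded by Pre_
  | some best0 =>
    let st := array_n.reverse.foldl
      (fun (st : Int × Int) x => if st.1 < x then (x, st.2 + 1) else st) (best0, 0)
    k + st.2

-- ===== PRECONDITION & SPEC =====
-- Pre_ excludes only the empty list, on which A raises IndexError (array_n[-1]).
def Pre_find_num_eversions (array_n : List Int) (k : Int) : Prop := array_n ≠ []
instance (array_n : List Int) (k : Int) : Decidable (Pre_find_num_eversions array_n k) := by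
  unfold Pre_find_num_eversions; infer_instance

def pvWitness_find_num_eversions : List Int × Int := ([3, 1, 2], 0)

def Spec_find_num_eversions (array_n : List Int) (k : Int) (out : Int) : Prop := out = find_num_eversions_alt array_n k
instance (array_n : List Int) (k : Int) (out : Int) : Decidable (Spec_find_num_eversions array_n k out) := by unfold Spec_find_num_eversions; infer_instance

-- ===== CLAIM (what is proved, stated in full; the proofs are below) =====
def Claim_equal_find_num_eversions : Prop := ∀ (array_n : List Int) (k : Int), Dom_find_num_eversions array_n k → Pre_find_num_eversions array_n k → Spec_find_num_eversions array_n k (find_num_eversions array_n k)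

-- ===== LEMMAS AND PROOFS =====

-- number of strict running-maximum records, scanning a list with current best b
def pvRec : Int → List Int → Int
  | _, [] => 0
  | b, x :: xs => if b < x then 1 + pvRec x xs else pvRec b xs

theorem pvFoldl_rec (l : List Int) (b c : Int) :
    (l.foldl (fun (st : Int × Int) x => if st.1 < x then (x, st.2 + 1) else st) (b, c)).2
      = c + pvRec b l := by
  induction l generalizing b c with
  | nil => simp [pvRec]
  | cons x xs ih =>
    simp only [List.foldl_cons, pvRec]
    split <;> rw [ih] <;> ring

theorem pvRec_filter (l : List Int) (b b' : Int) (h : b ≤ b') :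
    pvRec b' (l.filter (fun x => decide (b < x))) = pvRec b' l := by
  induction l generalizing b' with
  | nil => rfl
  | cons x xs ih =>
    simp only [List.filter_cons]
    by_cases hbx : b < x
    · simp only [hbx, decide_true, if_true, pvRec]
      by_cases hb'x : b' < x
      · simp only [hb'x, if_true]
        rw [ih x (le_of_lt hbx)]
      · simp only [hb'x, if_false]
        rw [ih b' h]
    · simp only [hbx, decide_false, Bool.false_eq_true, if_false, pvRec]
      have hnb' : ¬ b' < x := by
        intro hc; exact hbx (lt_of_le_of_lt h hc)
      simp only [hnb', if_false]
      exact ih b' h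

def pvRecSelf : List Int → Int
  | [] => 0
  | h :: t => 1 + pvRec h t

theorem pvRec_eq_recSelf (l : List Int) (b : Int) :
    pvRec b l = pvRecSelf (l.filter (fun x => decide (b < x))) := by
  induction l generalizing b with
  | nil => rfl
  | cons x xs ih =>
    simp only [List.filter_cons, pvRec]
    by_cases hbx : b < x
    · simp only [hbx, decide_true, if_true, pvRecSelf]
      rw [pvRec_filter xs b x (le_of_lt hbx)]
    · simp only [hbx, decide_false, Bool.false_eq_true, if_false]
      exact ih b

-- B's value, written via pvRec
theorem pvAlt_eq (l : List Int) (k last : Int)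
    (h : PySem.List.pyGet? l (-1) = some last) :
    find_num_eversions_alt l k = k + pvRec last l.reverse := by
  unfold find_num_eversions_alt
  rw [h]
  simp only []
  rw [pvFoldl_rec]
  ring

theorem pvGetLast_rev (l : List Int) (last : Int)
    (h : PySem.List.pyGet? l (-1) = some last) :
    ∃ rest, l.reverse = last :: rest := by
  rw [PySem.List.pyGet?_neg_one] at h
  cases l with
  | nil => simp at h
  | cons a t =>
    have hne : (a :: t) ≠ ([] : List Int) := by simp
    have : (a :: t).reverse ≠ [] := by simp
    rcases List.exists_cons_of_ne_nil this with ⟨y, ys, hy⟩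
    refine ⟨ys, ?_⟩
    have : (a :: t).getLast? = some y := by
      rw [List.getLast?_eq_head?_reverse, hy]; rfl
    rw [h] at this
    injection this with hv
    rw [hy, hv]

theorem pvMain : ∀ (n : Nat) (l : List Int) (k : Int), l.length ≤ n → l ≠ [] →
    find_num_eversions l k = find_num_eversions_alt l k := by
  intro n
  induction n with
  | zero => intro l k hlen hne; cases l <;> simp_all
  | succ n ih =>
    intro l k hlen hne
    obtain ⟨last, hlast⟩ : ∃ v, PySem.List.pyGet? l (-1) = some v := by
      rw [PySem.List.pyGet?_neg_one]
      rcases List.exists_cons_of_ne_nil (by simpa using (List.reverse_ne_nil_iff).mpr hne : l.reverse ≠ []) with ⟨y, ys, hy⟩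
      exact ⟨y, by rw [List.getLast?_eq_head?_reverse, hy]; rfl⟩
    obtain ⟨m, hm⟩ : ∃ v, PySem.List.max? l (fun y => y) = some v := by
      cases hmx : PySem.List.max? l (fun y => y) with
      | none => exact absurd ((PySem.List.max?_eq_none_iff l (fun y => y)).mp hmx) hne
      | some v => exact ⟨v, rfl⟩
    have hlm : last ∈ l := PySem.List.mem_of_pyGet?_eq_some _ hlast
    have hmem : m ∈ l := PySem.List.max?_mem hm
    have hmax : ∀ y ∈ l, y ≤ m := PySem.List.max?_isMax hm
    obtain ⟨rest, hrev⟩ := pvGetLast_rev l last hlast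
    rw [find_num_eversions.eq_def]
    split
    · next h0 => simp [hlast] at h0
    · next lv h0 =>
      rw [hlast] at h0
      injection h0 with hv
      subst hv
      split
      · next h1 => simp [hm] at h1
      · next m' h1 =>
        rw [hm] at h1
        injection h1 with hm'
        subst hm'
        rw [pvAlt_eq l k last hlast, hrev]
        simp only [pvRec, lt_self_iff_false, if_false]
        by_cases heq : last = m
        · -- all elements ≤ last: no record in rest
          have hall : ∀ x ∈ rest, ¬ last < x := by
            intro x hx
            have : x ∈ l := by
              rw [← List.mem_reverse, hrev]; exact List.mem_cons_of_mem _ hx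
            have := hmax x this
            omega
          rw [if_pos heq]
          have : pvRec last rest = 0 := by
            rw [pvRec_eq_recSelf]
            have : rest.filter (fun x => decide (last < x)) = [] := by
              rw [List.filter_eq_nil_iff]
              intro x hx; simpa using hall x hx
            rw [this]; rfl
          omega
        · rw [if_neg heq]
          -- recursive case
          set f := l.filter (fun item => decide (last < item)) with hf
          have hlm' : last < m := lt_of_le_of_ne (hmax last hlm) heq
          have hmf : m ∈ f := by
            rw [hf, List.mem_filter]; exact ⟨hmem, by simpa using hlm'⟩
          have hfne : f ≠ [] := List.ne_nil_of_mem hmf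
          have hflen : f.length < l.length := pvFilter_len_lt l last hlm
          rw [ih f (k + 1) (by omega) hfne]
          -- now compare B on f with pvRec on rest
          obtain ⟨lastf, hlastf⟩ : ∃ v, PySem.List.pyGet? f (-1) = some v := by
            rw [PySem.List.pyGet?_neg_one]
            rcases List.exists_cons_of_ne_nil (by simpa using (List.reverse_ne_nil_iff).mpr hfne : f.reverse ≠ []) with ⟨y, ys, hy⟩
            exact ⟨y, by rw [List.getLast?_eq_head?_reverse, hy]; rfl⟩
          obtain ⟨restf, hrevf⟩ := pvGetLast_rev f lastf hlastf
          rw [pvAlt_eq f (k + 1) lastf hlastf, hrevf]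
          simp only [pvRec, lt_self_iff_false, if_false]
          -- f.reverse = rest.filter (last < ·)
          have hfr : f.reverse = rest.filter (fun x => decide (last < x)) := by
            rw [hf, ← List.filter_reverse, hrev]
            simp [List.filter_cons]
          rw [pvRec_eq_recSelf rest last, ← hfr, hrevf]
          simp only [pvRecSelf]
          omega

-- ===== VERDICT (by name: the statement is the Claim_ definition above) =====
theorem find_num_eversions_spec : Claim_equal_find_num_eversions := by
  intro l k _ hpre
  unfold Spec_find_num_eversions
  exact pvMain l.length l k le_rfl hpre
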